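-- pv_equiv track=rewrite | github.com/sean-engelstad/gpu_fem | examples/multigrid/2_gmg_plate/src/_dkt_plate_elem.py | get_bcs
-- ===== SOURCE A (Python) =====
-- def get_bcs(nxe):
--     # now apply bcs to the stiffness matrix and forces
--     nx = nxe + 1
--     bcs = []
--     for iy in range(nx):
--         for ix in range(nx):
--             inode = nx * iy + ix
--
--             if ix in [0, nx-1] or iy in [0, nx-1]:
--                 bcs += [3 * inode]
--             elif ix in [0, nx-1]:
--                 bcs += [3 * inode + 2] # theta y = 0 on y=const edge
--             elif iy in [0, nx-1]:
--                 bcs += [3 * inode + 1] # theta x = 0 on x=const edge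
--     return bcs
-- ===== SOURCE B (Python) =====
-- def get_bcs(nxe):
--     # Visit only the boundary nodes directly (top row, edge columns of middle rows,
--     # bottom row) in row-major order, instead of scanning the whole nx*nx grid.
--     nx = nxe + 1
--     if nx <= 0:
--         return []
--     bcs = [3 * ix for ix in range(nx)]          # top row (iy = 0)
--     if nx == 1:
--         return bcs
--     for iy in range(1, nx - 1):                 # middle rows: left & right columns
--         base = nx * iy
--         bcs.append(3 * base)
--         bcs.append(3 * (base + nx - 1))
--     last = nx * (nx - 1)
--     bcs += [3 * (last + ix) for ix in range(nx)]  # bottom row (iy = nx-1)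
--     return bcs
-- ===== Notes on version B (the rewrite author's own statement) =====
-- stated objective: faster
-- what changed: B enumerates only the boundary nodes (top row, the two edge columns of the middle rows, bottom row) in row-major order instead of scanning all nx*nx grid nodes and testing each for boundary membership, turning the O(nx^2) double loop into O(nx) output-sized work.
import Mathlib
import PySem

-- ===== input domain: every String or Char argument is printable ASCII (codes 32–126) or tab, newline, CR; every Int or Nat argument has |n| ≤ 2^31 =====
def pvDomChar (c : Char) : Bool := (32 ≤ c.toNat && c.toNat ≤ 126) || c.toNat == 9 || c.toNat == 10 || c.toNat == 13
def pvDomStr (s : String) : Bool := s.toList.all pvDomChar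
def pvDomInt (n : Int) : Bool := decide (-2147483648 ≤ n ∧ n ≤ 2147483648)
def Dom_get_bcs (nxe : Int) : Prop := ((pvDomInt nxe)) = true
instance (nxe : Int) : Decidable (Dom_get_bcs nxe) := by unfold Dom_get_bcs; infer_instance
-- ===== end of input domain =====

-- B enumerates only the boundary nodes (top row, edge columns of middle rows, bottom row)
-- in row-major order instead of scanning the whole nx*nx grid and testing each node.

-- ===== PORT A =====
-- literal port of A; the Python local 'inode = nx * iy + ix' is inlined at its uses
def get_bcs (nxe : Int) : List Int :=
  let nx := nxe + 1
  (PySem.List.pyRange 0 nx 1).foldl (fun bcs iy =>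
    (PySem.List.pyRange 0 nx 1).foldl (fun bcs ix =>
      if ix = 0 ∨ ix = nx - 1 ∨ (iy = 0 ∨ iy = nx - 1) then bcs ++ [3 * (nx * iy + ix)]
      else if ix = 0 ∨ ix = nx - 1 then bcs ++ [3 * (nx * iy + ix) + 2]
      else if iy = 0 ∨ iy = nx - 1 then bcs ++ [3 * (nx * iy + ix) + 1]
      else bcs) bcs) []

-- ===== PORT B =====
-- literal port of Source B; 'base = nx * iy' and 'last = nx * (nx - 1)' are inlined at their uses
def get_bcs_alt (nxe : Int) : List Int :=
  let nx := nxe + 1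
  if nx ≤ 0 then []
  else
    let top := (PySem.List.pyRange 0 nx 1).map (fun ix => 3 * ix)
    if nx = 1 then top
    else
      let bcs := (PySem.List.pyRange 1 (nx - 1) 1).foldl
        (fun bcs iy => bcs ++ [3 * (nx * iy), 3 * (nx * iy + nx - 1)]) top
      bcs ++ (PySem.List.pyRange 0 nx 1).map (fun ix => 3 * (nx * (nx - 1) + ix))

-- ===== PRECONDITION & SPEC =====
def Spec_get_bcs (nxe : Int) (out : List Int) : Prop := out = get_bcs_alt nxe
instance (nxe : Int) (out : List Int) : Decidable (Spec_get_bcs nxe out) := by unfold Spec_get_bcs; infer_instance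

-- ===== CLAIM (what is proved, stated in full; the proofs are below) =====
def Claim_equal_get_bcs : Prop := ∀ (nxe : Int), Dom_get_bcs nxe → Spec_get_bcs nxe (get_bcs nxe)

-- ===== LEMMAS AND PROOFS =====

-- For nx ≥ 2, range(nx) splits as 0, the interior 1..nx-2, and nx-1.
theorem pv_range_split (nx : Int) (h2 : 2 ≤ nx) :
    PySem.List.pyRange 0 nx 1
      = (0 : Int) :: (PySem.List.pyRange 1 (nx - 1) 1 ++ [nx - 1]) := by
  rw [PySem.List.pyRange_one_cons (by omega)]
  congr 1
  rw [show (0:Int) + 1 = 1 from by norm_num]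
  rw [PySem.List.pyRange_one_append 1 (nx - 1) nx (by omega) (by omega),
      PySem.List.pyRange_one_cons (show nx - 1 < nx by omega),
      show nx - 1 + 1 = nx from by ring,
      PySem.List.pyRange_one_eq_nil (le_refl nx)]

-- A's inner loop over a full boundary row (iy = 0 or iy = nx-1) appends every node.
theorem pv_inner_full (nx iy : Int) (b : List Int) (h : iy = 0 ∨ iy = nx - 1) :
    (PySem.List.pyRange 0 nx 1).foldl (fun bcs ix =>
      if ix = 0 ∨ ix = nx - 1 ∨ (iy = 0 ∨ iy = nx - 1) then bcs ++ [3 * (nx * iy + ix)]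
      else if ix = 0 ∨ ix = nx - 1 then bcs ++ [3 * (nx * iy + ix) + 2]
      else if iy = 0 ∨ iy = nx - 1 then bcs ++ [3 * (nx * iy + ix) + 1]
      else bcs) b
    = b ++ (PySem.List.pyRange 0 nx 1).map (fun ix => 3 * (nx * iy + ix)) := by
  have hf : (fun (bcs : List Int) (ix : Int) =>
      if ix = 0 ∨ ix = nx - 1 ∨ (iy = 0 ∨ iy = nx - 1) then bcs ++ [3 * (nx * iy + ix)]
      else if ix = 0 ∨ ix = nx - 1 then bcs ++ [3 * (nx * iy + ix) + 2]
      else if iy = 0 ∨ iy = nx - 1 then bcs ++ [3 * (nx * iy + ix) + 1]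
      else bcs)
      = (fun (bcs : List Int) (ix : Int) => bcs ++ [3 * (nx * iy + ix)]) := by
    funext bcs ix
    rw [if_pos (Or.inr (Or.inr h))]
  rw [hf]
  exact PySem.List.foldl_append_singleton_eq_map _ _ _

-- folding a no-op body leaves the accumulator unchanged
theorem pv_foldl_id (l : List Int) (acc : List Int) :
    l.foldl (fun (bcs : List Int) (_ : Int) => bcs) acc = acc := by
  induction l generalizing acc with
  | nil => rfl
  | cons x xs ih => simp only [List.foldl_cons]; exact ih acc

-- A's inner loop over a middle row appends only the two edge nodes.
theorem pv_inner_mid (nx iy : Int) (b : List Int) (h1 : 1 ≤ iy) (h2 : iy < nx - 1) :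
    (PySem.List.pyRange 0 nx 1).foldl (fun bcs ix =>
      if ix = 0 ∨ ix = nx - 1 ∨ (iy = 0 ∨ iy = nx - 1) then bcs ++ [3 * (nx * iy + ix)]
      else if ix = 0 ∨ ix = nx - 1 then bcs ++ [3 * (nx * iy + ix) + 2]
      else if iy = 0 ∨ iy = nx - 1 then bcs ++ [3 * (nx * iy + ix) + 1]
      else bcs) b
    = b ++ [3 * (nx * iy), 3 * (nx * iy + nx - 1)] := by
  rw [pv_range_split nx (by omega)]
  rw [List.foldl_cons, List.foldl_append]
  rw [if_pos (Or.inl rfl)]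
  rw [PySem.List.foldl_congr_mem (PySem.List.pyRange 1 (nx - 1) 1) _
    (fun (bcs : List Int) (_ : Int) => bcs) _
    (by
      intro acc x hx
      rw [PySem.List.mem_pyRange_one] at hx
      rw [if_neg (by omega), if_neg (by omega), if_neg (by omega)])]
  rw [pv_foldl_id]
  rw [List.foldl_cons, List.foldl_nil]
  rw [if_pos (Or.inr (Or.inl rfl))]
  have e1 : 3 * (nx * iy + 0) = 3 * (nx * iy) := by ring
  have e2 : 3 * (nx * iy + (nx - 1)) = 3 * (nx * iy + nx - 1) := by ring
  rw [e1, e2]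
  simp

-- the whole equivalence, stated on nx = nxe + 1 with both lets unfolded
theorem pv_main (nx : Int) :
    (PySem.List.pyRange 0 nx 1).foldl (fun bcs iy =>
      (PySem.List.pyRange 0 nx 1).foldl (fun bcs ix =>
        if ix = 0 ∨ ix = nx - 1 ∨ (iy = 0 ∨ iy = nx - 1) then bcs ++ [3 * (nx * iy + ix)]
        else if ix = 0 ∨ ix = nx - 1 then bcs ++ [3 * (nx * iy + ix) + 2]
        else if iy = 0 ∨ iy = nx - 1 then bcs ++ [3 * (nx * iy + ix) + 1]
        else bcs) bcs) []
    = (if nx ≤ 0 then []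
       else if nx = 1 then (PySem.List.pyRange 0 nx 1).map (fun ix => 3 * ix)
       else ((PySem.List.pyRange 1 (nx - 1) 1).foldl
              (fun bcs iy => bcs ++ [3 * (nx * iy), 3 * (nx * iy + nx - 1)])
              ((PySem.List.pyRange 0 nx 1).map (fun ix => 3 * ix)))
            ++ (PySem.List.pyRange 0 nx 1).map (fun ix => 3 * (nx * (nx - 1) + ix))) := by
  by_cases h0 : nx ≤ 0
  · rw [if_pos h0, PySem.List.pyRange_one_eq_nil h0]
    rfl
  · by_cases h1 : nx = 1
    · subst h1
      decide
    · rw [if_neg h0, if_neg h1]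
      have h2 : 2 ≤ nx := by omega
      set G := (fun (bcs : List Int) (iy : Int) =>
        (PySem.List.pyRange 0 nx 1).foldl (fun bcs ix =>
          if ix = 0 ∨ ix = nx - 1 ∨ (iy = 0 ∨ iy = nx - 1) then bcs ++ [3 * (nx * iy + ix)]
          else if ix = 0 ∨ ix = nx - 1 then bcs ++ [3 * (nx * iy + ix) + 2]
          else if iy = 0 ∨ iy = nx - 1 then bcs ++ [3 * (nx * iy + ix) + 1]
          else bcs) bcs) with hG
      conv_lhs => rw [pv_range_split nx h2]
      rw [List.foldl_cons, List.foldl_append]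
      rw [show ∀ b, G b 0 = b ++ (PySem.List.pyRange 0 nx 1).map (fun ix => 3 * (nx * 0 + ix))
        from fun b => pv_inner_full nx 0 b (Or.inl rfl)]
      have htop : (PySem.List.pyRange 0 nx 1).map (fun ix => 3 * (nx * 0 + ix))
          = (PySem.List.pyRange 0 nx 1).map (fun ix => 3 * ix) := by
        simp
      rw [htop, List.nil_append]
      rw [PySem.List.foldl_congr_mem (PySem.List.pyRange 1 (nx - 1) 1) G
        (fun (bcs : List Int) (iy : Int) => bcs ++ [3 * (nx * iy), 3 * (nx * iy + nx - 1)]) _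
        (by
          intro acc x hx
          rw [PySem.List.mem_pyRange_one] at hx
          exact pv_inner_mid nx x acc hx.1 hx.2)]
      rw [List.foldl_cons, List.foldl_nil]
      rw [show ∀ b, G b (nx - 1)
            = b ++ (PySem.List.pyRange 0 nx 1).map (fun ix => 3 * (nx * (nx - 1) + ix))
        from fun b => pv_inner_full nx (nx - 1) b (Or.inr rfl)]

-- ===== VERDICT (by name: the statement is the Claim_ definition above) =====
theorem get_bcs_spec : Claim_equal_get_bcs := by
  intro nxe _
  unfold Spec_get_bcs get_bcs get_bcs_alt
  exact pv_main (nxe + 1)
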